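-- pv_equiv track=rewrite | github.com/aaab8b/dit_benchmarking | analysis_json_mi308.py | look_k
-- ===== SOURCE A (Python) =====
-- def look_k(arr):
--     my_dict = {}
--     out = None
--     for cur in arr:
--         if cur not in my_dict.keys():
--             my_dict[cur] = 1
--         else:
--             num = my_dict[cur]
--             num += 1
--             my_dict[cur] = num
--     for key in my_dict.keys():
--         num = my_dict[key]
--         if num >= 2:
--             out = key
--             break
--     return out
-- ===== SOURCE B (Python) =====
-- def look_k(arr):
--     seen = set()
--     dup = set()
--     for x in arr:
--         if x in seen:
--             dup.add(x)
--         else: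
--             seen.add(x)
--     for x in arr:
--         if x in dup:
--             return x
--     return None
-- ===== Notes on version B (the rewrite author's own statement) =====
-- stated objective: simpler
-- what changed: B maintains two sets (seen/duplicated) in one pass instead of a count dictionary, and makes the deciding scan over the original list rather than over dict keys; no counts are kept at all.
import Mathlib
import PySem

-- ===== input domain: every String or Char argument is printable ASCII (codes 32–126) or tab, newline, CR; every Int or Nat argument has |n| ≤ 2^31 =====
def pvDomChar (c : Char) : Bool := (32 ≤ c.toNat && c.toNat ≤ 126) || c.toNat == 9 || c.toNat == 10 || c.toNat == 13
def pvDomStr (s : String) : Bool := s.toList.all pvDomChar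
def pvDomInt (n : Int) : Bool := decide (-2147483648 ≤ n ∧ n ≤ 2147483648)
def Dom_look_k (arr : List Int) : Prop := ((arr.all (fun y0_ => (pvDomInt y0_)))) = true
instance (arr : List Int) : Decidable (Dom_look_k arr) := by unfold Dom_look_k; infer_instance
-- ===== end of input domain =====

-- B replaces A's count dictionary by a single pass maintaining seen/duplicated sets,
-- then scans the original list for the first duplicated element (objective: simpler).

-- ===== PORT A =====
def look_k (arr : List Int) : Option Int :=
  let d := arr.foldl (fun d cur =>
      if d.contains cur = false then d.insert cur (1 : Int)
      else d.insert cur (d.getD cur 0 + 1)) PySem.Dict.empty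
  d.keys.find? (fun k => decide ((2 : Int) ≤ d.getD k 0))

-- ===== PORT B =====
def look_k_alt (arr : List Int) : Option Int :=
  let sd := arr.foldl (fun (p : PySem.Set Int × PySem.Set Int) x =>
      if PySem.Set.contains p.1 x then (p.1, PySem.Set.add p.2 x)
      else (PySem.Set.add p.1 x, p.2)) (PySem.Set.empty, PySem.Set.empty)
  arr.find? (fun x => PySem.Set.contains sd.2 x)

-- ===== PRECONDITION & SPEC =====
def Spec_look_k (arr : List Int) (out : Option Int) : Prop := out = look_k_alt arr
instance (arr : List Int) (out : Option Int) : Decidable (Spec_look_k arr out) := by unfold Spec_look_k; infer_instance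

-- ===== CLAIM (what is proved, stated in full; the proofs are below) =====
def Claim_equal_look_k : Prop := ∀ (arr : List Int), Dom_look_k arr → Spec_look_k arr (look_k arr)

-- ===== LEMMAS AND PROOFS =====

-- A's per-element dict update is exactly 'insert cur (getD cur 0 + 1)'
theorem stepA_eq (d : PySem.Dict Int Int) (x : Int) :
    (if d.contains x = false then d.insert x (1 : Int)
     else d.insert x (d.getD x 0 + 1)) = d.insert x (d.getD x 0 + 1) := by
  cases h : d.contains x with
  | false => rw [PySem.Dict.getD_of_not_contains (h := h)]; norm_num
  | true => simp

-- A's result: first key of set(arr) whose count in arr is ≥ 2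
theorem look_k_eq (arr : List Int) :
    look_k arr = (PySem.Set.ofList arr).find? (fun k => decide (2 ≤ arr.count k)) := by
  have hfun : (fun (d : PySem.Dict Int Int) cur =>
      if d.contains cur = false then d.insert cur (1 : Int)
      else d.insert cur (d.getD cur 0 + 1))
      = fun d cur => d.insert cur (d.getD cur 0 + 1) :=
    funext fun d => funext fun x => stepA_eq d x
  have hpred : ∀ k : Int, decide ((2 : Int) ≤ (PySem.Dict.counter arr).getD k 0)
      = decide (2 ≤ arr.count k) := by
    intro k
    rw [PySem.Dict.getD_counter, decide_eq_decide]
    exact_mod_cast Iff.rfl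
  simp only [look_k, hfun, PySem.Dict.foldl_insert_getD_add_one_eq_counter,
    PySem.Dict.keys_counter, hpred]

-- B's duplicated set after the fold contains exactly the elements counted ≥ 2
theorem dup_mem (l : List Int) : ∀ (s d : List Int) (x : Int),
    (x ∈ (l.foldl (fun (p : PySem.Set Int × PySem.Set Int) x =>
      if PySem.Set.contains p.1 x then (p.1, PySem.Set.add p.2 x)
      else (PySem.Set.add p.1 x, p.2)) (s, d)).2)
    ↔ (x ∈ d ∨ (x ∈ s ∧ x ∈ l) ∨ 2 ≤ l.count x) := by
  induction l with
  | nil => simp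
  | cons a t ih =>
    intro s d x
    have hmem : x ∈ t ↔ 1 ≤ t.count x := List.count_pos_iff.symm
    have hcc : (a :: t).count x = t.count x + (if x = a then 1 else 0) := by
      rcases eq_or_ne x a with rfl | hxa
      · simp
      · simp [hxa, Ne.symm hxa]
    cases hc : PySem.Set.contains s a with
    | false =>
      have ha : a ∉ s := by simpa using hc
      simp only [List.foldl_cons, hc]
      rw [if_neg Bool.false_ne_true, ih, PySem.Set.mem_add, List.mem_cons, hcc]
      by_cases hxa : x = a
      · subst hxa
        rw [if_pos rfl]
        constructor
        · rintro (h | ⟨h1, h2⟩ | h)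
          · exact Or.inl h
          · have := hmem.mp h2; right; right; omega
          · right; right; omega
        · rintro (h | ⟨h1, h2⟩ | h)
          · exact Or.inl h
          · exact absurd h1 ha
          · exact Or.inr (Or.inl ⟨Or.inr rfl, hmem.mpr (by omega)⟩)
      · rw [if_neg hxa]
        constructor
        · rintro (h | ⟨h1 | h1, h2⟩ | h)
          · exact Or.inl h
          · exact Or.inr (Or.inl ⟨h1, Or.inr h2⟩)
          · exact absurd h1 hxa
          · right; right; omega
        · rintro (h | ⟨h1, h2 | h2⟩ | h)
          · exact Or.inl h
          · exact absurd h2 hxa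
          · exact Or.inr (Or.inl ⟨Or.inl h1, h2⟩)
          · right; right; omega
    | true =>
      have ha : a ∈ s := by simpa using hc
      simp only [List.foldl_cons, hc]
      rw [if_pos trivial, ih, PySem.Set.mem_add, List.mem_cons, hcc]
      by_cases hxa : x = a
      · subst hxa
        rw [if_pos rfl]
        constructor
        · intro _; exact Or.inr (Or.inl ⟨ha, Or.inl rfl⟩)
        · intro _; exact Or.inl (Or.inr rfl)
      · rw [if_neg hxa]
        constructor
        · rintro ((h | h) | ⟨h1, h2⟩ | h)
          · exact Or.inl h
          · exact absurd h hxa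
          · exact Or.inr (Or.inl ⟨h1, Or.inr h2⟩)
          · right; right; omega
        · rintro (h | ⟨h1, h2 | h2⟩ | h)
          · exact Or.inl (Or.inl h)
          · exact absurd h2 hxa
          · exact Or.inr (Or.inl ⟨h1, h2⟩)
          · right; right; omega

theorem look_k_alt_eq (arr : List Int) :
    look_k_alt arr = arr.find? (fun k => decide (2 ≤ arr.count k)) := by
  unfold look_k_alt
  dsimp only
  congr 1
  funext x
  have h2 := dup_mem arr [] [] x
  simp only [List.not_mem_nil, false_and, false_or] at h2
  rw [Bool.eq_iff_iff]
  exact ⟨fun h => decide_eq_true (h2.mp (List.mem_of_elem_eq_true h)),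
    fun h => List.elem_eq_true_of_mem (h2.mpr (of_decide_eq_true h))⟩

-- first-occurrence dedup does not change the first element satisfying p
theorem find?_discard (p : Int → Bool) (x : Int) (hx : p x = false) :
    ∀ (s : List Int), (PySem.Set.discard s x).find? p = s.find? p := by
  intro s
  induction s with
  | nil => rfl
  | cons a t ih =>
    unfold PySem.Set.discard at ih ⊢
    rw [List.filter_cons]
    by_cases hax : a = x
    · subst hax
      rw [if_neg (by simp), List.find?_cons_of_neg (by simp [hx]), ih]
    · rw [if_pos (by simp [hax])]
      cases hpa : p a
      · rw [List.find?_cons_of_neg (by simp [hpa]), List.find?_cons_of_neg (by simp [hpa]), ih]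
      · rw [List.find?_cons_of_pos (by simp [hpa]), List.find?_cons_of_pos (by simp [hpa])]

theorem find?_ofList (p : Int → Bool) (l : List Int) :
    (PySem.Set.ofList l).find? p = l.find? p := by
  induction l with
  | nil => rfl
  | cons a t ih =>
    rw [PySem.Set.ofList_cons]
    cases hpa : p a
    · rw [List.find?_cons_of_neg (by simp [hpa]), List.find?_cons_of_neg (by simp [hpa]),
        find?_discard p a hpa, ih]
    · rw [List.find?_cons_of_pos (by simp [hpa]), List.find?_cons_of_pos (by simp [hpa])]

-- ===== VERDICT (by name: the statement is the Claim_ definition above) =====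
theorem look_k_spec : Claim_equal_look_k := by
  intro arr _
  unfold Spec_look_k
  rw [look_k_eq, look_k_alt_eq, find?_ofList]
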